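-- pv_equiv track=rewrite | github.com/maqboolahmed24/taxat_ | tools/analysis/build_entity_artifact_catalog.py | infer_identity_fields
-- ===== SOURCE A (Python) =====
-- from typing import Any, Iterable
--
-- def ordered_unique(values: Iterable[str]) -> list[str]:
--     seen: set[str] = set()
--     result: list[str] = []
--     for value in values:
--         if not value or value in seen:
--             continue
--         seen.add(value)
--         result.append(value)
--     return result
--
-- def infer_identity_fields(field_tokens: list[str]) -> list[str]:
--     preferred = [
--         token
--         for token in field_tokens
--         if token.endswith("_id")
--         or token in {"tenant_id", "client_id", "manifest_id", "shell_family", "object_anchor_ref"}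
--     ]
--     return ordered_unique(preferred[:8])
-- ===== SOURCE B (Python) =====
-- def infer_identity_fields(field_tokens):
--     """First eight distinct identity-like field tokens, in order of first appearance."""
--     identity_names = {"tenant_id", "client_id", "manifest_id", "shell_family", "object_anchor_ref"}
--     seen = set()
--     result = []
--     for token in field_tokens:
--         if len(result) == 8:
--             break
--         if (token.endswith("_id") or token in identity_names) and token not in seen:
--             seen.add(token)
--             result.append(token)
--     return result
-- ===== Notes on version B (the rewrite author's own statement) =====
-- stated objective: simpler
-- what changed: Replaced the three-stage pipeline (filter comprehension, [:8] slice, separate ordered_unique helper) with a single pass that collects matching tokens into a deduplicated result and stops at eight distinct ones.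
-- intended difference: On lists whose first eight identity-like matches contain a duplicate while further distinct matches exist later, A returns fewer than eight fields (duplicates consume the 8-slot budget before dedup), whereas B returns the first eight DISTINCT identity fields, which is the intended catalog content. — e.g. on infer_identity_fields(["a_id", "a_id", "b_id", "c_id", "d_id", "e_id", "f_id", "g_id", "h_id"]): A returns ["a_id", "b_id", "c_id", "d_id", "e_id", "f_id", "g_id"], B returns ["a_id", "b_id", "c_id", "d_id", "e_id", "f_id", "g_id", "h_id"]
import Mathlib
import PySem

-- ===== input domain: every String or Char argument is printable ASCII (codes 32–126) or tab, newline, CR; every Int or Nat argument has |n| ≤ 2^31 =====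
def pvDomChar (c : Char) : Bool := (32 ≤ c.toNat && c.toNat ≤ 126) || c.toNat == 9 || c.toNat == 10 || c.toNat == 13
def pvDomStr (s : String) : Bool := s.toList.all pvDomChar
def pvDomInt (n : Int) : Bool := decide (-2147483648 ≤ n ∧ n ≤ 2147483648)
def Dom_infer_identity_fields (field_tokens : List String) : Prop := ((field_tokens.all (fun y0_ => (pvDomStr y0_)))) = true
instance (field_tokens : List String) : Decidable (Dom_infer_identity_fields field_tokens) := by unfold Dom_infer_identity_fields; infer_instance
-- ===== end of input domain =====

-- B replaces A's filter → [:8] slice → ordered_unique pipeline with one deduplicating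
-- pass that stops at eight distinct identity fields (simpler); on inputs where a
-- duplicate sits among the first eight matches A returns fewer than eight fields and
-- B returns the first eight distinct ones (stated as the intended difference D_ below).

-- the shared token predicate: ends with "_id" or is one of the named identity fields
def pvIsPreferred (token : String) : Bool :=
  PySem.Str.endswith token "_id" ||
    PySem.Set.contains (PySem.Set.ofList ["tenant_id", "client_id", "manifest_id", "shell_family", "object_anchor_ref"]) token

-- ===== PORT A =====
-- the loop of ordered_unique, building result front-to-back
def pvUniqGo (seen : PySem.Set String) : List String → List String
  | [] => []
  | v :: rest =>
    if v == "" || PySem.Set.contains seen v then pvUniqGo seen rest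
    else v :: pvUniqGo (PySem.Set.add seen v) rest

def ordered_unique (values : List String) : List String :=
  pvUniqGo PySem.Set.empty values

def infer_identity_fields (field_tokens : List String) : List String :=
  ordered_unique (PySem.List.slice (field_tokens.filter pvIsPreferred) none (some 8))

-- ===== PORT B =====
-- single pass: append unseen matching tokens to result, stop when result has 8
def pvAltGo (seen : PySem.Set String) (result : List String) : List String → List String
  | [] => result
  | token :: rest =>
    if result.length == 8 then result
    else if pvIsPreferred token && !(PySem.Set.contains seen token) then
      pvAltGo (PySem.Set.add seen token) (result ++ [token]) rest
    else pvAltGo seen result rest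

def infer_identity_fields_alt (field_tokens : List String) : List String :=
  pvAltGo PySem.Set.empty [] field_tokens

-- ===== PRECONDITION & SPEC =====
-- On lists whose first eight identity-like matches contain a duplicate while further
-- distinct matches exist, A returns fewer than eight fields (duplicates consume the
-- 8-slot budget before dedup) and B returns the first eight distinct identity fields,
-- which is the intended catalog content.
def D_infer_identity_fields (field_tokens : List String) : Prop :=
  (PySem.List.dedup ((field_tokens.filter pvIsPreferred).take 8)).length <
    min 8 (PySem.List.dedup (field_tokens.filter pvIsPreferred)).length
instance (field_tokens : List String) : Decidable (D_infer_identity_fields field_tokens) := by unfold D_infer_identity_fields; infer_instance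

def Spec_infer_identity_fields (field_tokens : List String) (out : List String) : Prop := ¬ D_infer_identity_fields field_tokens → out = infer_identity_fields_alt field_tokens
instance (field_tokens : List String) (out : List String) : Decidable (Spec_infer_identity_fields field_tokens out) := by unfold Spec_infer_identity_fields; infer_instance

def pvDiffWitness_infer_identity_fields : List String :=
  ["a_id", "a_id", "b_id", "c_id", "d_id", "e_id", "f_id", "g_id", "h_id"]
def pvDiffWitnessOut_infer_identity_fields : (List String) × (List String) :=
  (["a_id", "b_id", "c_id", "d_id", "e_id", "f_id", "g_id"],
   ["a_id", "b_id", "c_id", "d_id", "e_id", "f_id", "g_id", "h_id"])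

-- ===== CLAIM (what is proved, stated in full; the proofs are below) =====
def Claim_unchanged_infer_identity_fields : Prop := ∀ (field_tokens : List String), Dom_infer_identity_fields field_tokens → Spec_infer_identity_fields field_tokens (infer_identity_fields field_tokens)
def Claim_changed_infer_identity_fields : Prop := Dom_infer_identity_fields (pvDiffWitness_infer_identity_fields) ∧ D_infer_identity_fields (pvDiffWitness_infer_identity_fields) ∧ infer_identity_fields (pvDiffWitness_infer_identity_fields) = pvDiffWitnessOut_infer_identity_fields.1 ∧ infer_identity_fields_alt (pvDiffWitness_infer_identity_fields) = pvDiffWitnessOut_infer_identity_fields.2 ∧ pvDiffWitnessOut_infer_identity_fields.1 ≠ pvDiffWitnessOut_infer_identity_fields.2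
def Claim_exact_infer_identity_fields : Prop := ∀ (field_tokens : List String), Dom_infer_identity_fields field_tokens → D_infer_identity_fields field_tokens → infer_identity_fields field_tokens ≠ infer_identity_fields_alt field_tokens

-- ===== LEMMAS AND PROOFS =====

-- common denominator: first-occurrence dedup relative to a seen set
def pvU (seen : PySem.Set String) : List String → List String
  | [] => []
  | v :: rest =>
    if PySem.Set.contains seen v then pvU seen rest
    else v :: pvU (PySem.Set.add seen v) rest

-- a preferred token is never the empty string
theorem pvIsPreferred_ne_empty {t : String} (h : pvIsPreferred t = true) : (t == "") = false := by
  by_cases he : t = ""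
  · subst he; exact absurd h (by decide)
  · simpa using he

-- A's dedup loop is pvU on lists without empty strings
theorem pvUniqGo_eq_pvU : ∀ (l : List String) (seen : PySem.Set String),
    (∀ x ∈ l, pvIsPreferred x = true) → pvUniqGo seen l = pvU seen l := by
  intro l
  induction l with
  | nil => intro seen _; rfl
  | cons t rest ih =>
    intro seen h
    have hne := pvIsPreferred_ne_empty (h t (by simp))
    rw [pvUniqGo, pvU, hne]
    simp only [Bool.false_or]
    by_cases hc : PySem.Set.contains seen t = true
    · rw [if_pos hc, if_pos hc, ih seen (fun x hx => h x (by simp [hx]))]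
    · rw [if_neg hc, if_neg hc, ih (PySem.Set.add seen t) (fun x hx => h x (by simp [hx]))]

-- B's loop: result plus the next new matches, up to the remaining budget
theorem pvAltGo_eq : ∀ (l : List String) (seen : PySem.Set String) (res : List String),
    res.length ≤ 8 →
    pvAltGo seen res l = res ++ (pvU seen (l.filter pvIsPreferred)).take (8 - res.length) := by
  intro l
  induction l with
  | nil => intro seen res _; simp [pvAltGo, pvU]
  | cons t rest ih =>
    intro seen res hr
    rw [pvAltGo]
    by_cases h8 : res.length = 8
    · simp [h8]
    · have hlt : res.length < 8 := lt_of_le_of_ne hr h8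
      simp only [show (res.length == 8) = false from by simpa using h8]
      by_cases hp : pvIsPreferred t = true
      · rw [List.filter_cons_of_pos hp, pvU]
        by_cases hc : PySem.Set.contains seen t = true
        · rw [if_pos hc]
          simp only [hp, hc, Bool.not_true, Bool.and_false]
          exact ih seen res hr
        · rw [if_neg hc]
          simp only [hp, show PySem.Set.contains seen t = false from by simpa using hc,
            Bool.not_false, Bool.and_true, if_true]
          rw [ih (PySem.Set.add seen t) (res ++ [t]) (by simp; omega)]
          rw [show 8 - res.length = (8 - (res ++ [t]).length) + 1 from by simp; omega]
          simp [List.take_succ_cons]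
      · rw [List.filter_cons_of_neg (by simpa using hp)]
        simp only [show pvIsPreferred t = false from by simpa using hp, Bool.false_and]
        exact ih seen res hr

-- membership in pvU
theorem mem_pvU : ∀ (l : List String) (seen : PySem.Set String) (x : String),
    x ∈ pvU seen l ↔ x ∈ l ∧ x ∉ seen := by
  intro l
  induction l with
  | nil => intro seen x; simp [pvU]
  | cons t rest ih =>
    intro seen x
    rw [pvU]
    by_cases hc : PySem.Set.contains seen t = true
    · have ht : t ∈ seen := (PySem.Set.contains_iff seen t).mp hc
      rw [if_pos hc, ih]
      constructor
      · rintro ⟨hx, hs⟩; exact ⟨by simp [hx], hs⟩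
      · rintro ⟨hx, hs⟩
        rcases List.mem_cons.mp hx with h | h
        · exact absurd (h ▸ ht) hs
        · exact ⟨h, hs⟩
    · have ht : t ∉ seen := fun h => hc ((PySem.Set.contains_iff seen t).mpr h)
      rw [if_neg hc]
      simp only [List.mem_cons, ih, PySem.Set.mem_add seen t]
      constructor
      · rintro (rfl | ⟨hx, hs⟩)
        · exact ⟨Or.inl rfl, ht⟩
        · exact ⟨Or.inr hx, fun h => hs (Or.inl h)⟩
      · rintro ⟨hx, hs⟩
        by_cases hxt : x = t
        · exact Or.inl hxt
        · rcases hx with h | h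
          · exact absurd h hxt
          · exact Or.inr ⟨h, fun hm => hm.elim (fun h1 => hs h1) (fun h1 => hxt h1)⟩

-- pvU produces no duplicates
theorem nodup_pvU : ∀ (l : List String) (seen : PySem.Set String), (pvU seen l).Nodup := by
  intro l
  induction l with
  | nil => intro seen; simp [pvU]
  | cons t rest ih =>
    intro seen
    rw [pvU]
    by_cases hc : PySem.Set.contains seen t = true
    · rw [if_pos hc]; exact ih seen
    · rw [if_neg hc]
      refine List.nodup_cons.mpr ⟨fun h => ?_, ih _⟩
      have := (mem_pvU rest (PySem.Set.add seen t) t).mp h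
      exact this.2 ((PySem.Set.mem_add seen t t).mpr (Or.inr rfl))

-- pvU from the empty seen set has the length of the first-occurrence dedup
theorem length_pvU_empty (l : List String) :
    (pvU PySem.Set.empty l).length = (PySem.List.dedup l).length := by
  refine List.Perm.length_eq ?_
  refine (List.perm_ext_iff_of_nodup (nodup_pvU l _) (PySem.List.nodup_dedup l)).mpr ?_
  intro x
  rw [mem_pvU, PySem.List.mem_dedup l x]
  simp [PySem.Set.empty]

-- pvU never lengthens a list
theorem length_pvU_le : ∀ (l : List String) (seen : PySem.Set String),
    (pvU seen l).length ≤ l.length := by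
  intro l
  induction l with
  | nil => intro seen; simp [pvU]
  | cons t rest ih =>
    intro seen
    rw [pvU]
    by_cases hc : PySem.Set.contains seen t = true
    · rw [if_pos hc]; exact le_trans (ih seen) (by simp)
    · rw [if_neg hc]; simpa using ih (PySem.Set.add seen t)

-- pvU of a prefix is a prefix of pvU
theorem pvU_take_prefix : ∀ (l : List String) (n : Nat) (seen : PySem.Set String),
    pvU seen (l.take n) <+: pvU seen l := by
  intro l
  induction l with
  | nil => intro n seen; simp [pvU]
  | cons t rest ih =>
    intro n seen
    cases n with
    | zero => simp [pvU]
    | succ m =>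
      rw [List.take_succ_cons, pvU, pvU]
      by_cases hc : PySem.Set.contains seen t = true
      · rw [if_pos hc, if_pos hc]; exact ih m seen
      · rw [if_neg hc, if_neg hc]
        obtain ⟨tail, htail⟩ := ih m (PySem.Set.add seen t)
        exact ⟨tail, by rw [List.cons_append, htail]⟩

-- both ports in terms of pvU
theorem portA_eq (xs : List String) :
    infer_identity_fields xs = pvU PySem.Set.empty ((xs.filter pvIsPreferred).take 8) := by
  unfold infer_identity_fields ordered_unique
  rw [show PySem.List.slice (xs.filter pvIsPreferred) none (some 8) = (xs.filter pvIsPreferred).take 8 from by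
    simpa using PySem.List.slice_to (xs.filter pvIsPreferred) (b := 8) (by norm_num)]
  exact pvUniqGo_eq_pvU _ _ (fun x hx => (List.mem_filter.mp ((xs.filter pvIsPreferred).take_subset 8 hx)).2)

theorem portB_eq (xs : List String) :
    infer_identity_fields_alt xs = (pvU PySem.Set.empty (xs.filter pvIsPreferred)).take 8 := by
  unfold infer_identity_fields_alt
  simpa using pvAltGo_eq xs PySem.Set.empty [] (by simp)

-- ===== VERDICT (by name: the statements are the Claim_ definitions above) =====
theorem infer_identity_fields_spec : Claim_unchanged_infer_identity_fields := by
  intro xs _ hD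
  rw [portA_eq, portB_eq]
  have hpre := pvU_take_prefix (xs.filter pvIsPreferred) 8 PySem.Set.empty
  have hk8 : (pvU PySem.Set.empty ((xs.filter pvIsPreferred).take 8)).length ≤ 8 :=
    le_trans (length_pvU_le _ _) (by simp)
  have hkd := hpre.length_le
  unfold D_infer_identity_fields at hD
  rw [← length_pvU_empty, ← length_pvU_empty] at hD
  rw [List.prefix_iff_eq_take.mp hpre]
  have hkey : (pvU PySem.Set.empty ((xs.filter pvIsPreferred).take 8)).length
      = min 8 (pvU PySem.Set.empty (xs.filter pvIsPreferred)).length := by omega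
  rw [hkey]
  by_cases h : (pvU PySem.Set.empty (xs.filter pvIsPreferred)).length ≤ 8
  · rw [min_eq_right h, List.take_length, List.take_of_length_le h]
  · rw [min_eq_left (Nat.le_of_lt (Nat.lt_of_not_le h))]

theorem infer_identity_fields_changed : Claim_changed_infer_identity_fields := by
  unfold Claim_changed_infer_identity_fields; decide

theorem infer_identity_fields_tight : Claim_exact_infer_identity_fields := by
  intro xs _ hD heq
  rw [portA_eq, portB_eq] at heq
  have hlen := congrArg List.length heq
  rw [List.length_take] at hlen
  unfold D_infer_identity_fields at hD
  rw [← length_pvU_empty, ← length_pvU_empty] at hD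
  omega
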